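-- pv_equiv track=rewrite | github.com/Evilnames/Collector | sculpture.py | _make_pagoda_grid
-- ===== SOURCE A (Python) =====
-- def _empty(h):
--     return [[False] * 8 for _ in range(h * 4)]
--
-- def _make_pagoda_grid(height):
--     """Multi-tiered tower; each tier has a wide overhanging eave, narrowing toward the top."""
--     rows  = height * 4
--     tiers = min(4, max(2, height + 1))
--     g     = _empty(height)
--     tier_h    = rows // tiers
--     remainder = rows - tier_h * tiers
--     r_cur = 0
--     for t in range(tiers):
--         th    = tier_h + (1 if t >= tiers - remainder else 0)
--         r_end = r_cur + th
--         body_w = max(2, min(8, 2 + t * 2))   # t=0 narrowest, grows downward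
--         eave_w = min(8, body_w + 2)
--         for r in range(r_cur, r_end):
--             if r == rows - 1:                             # solid base row
--                 g[r] = [True] * 8
--             elif r == r_end - 1 and t < tiers - 1:        # eave row
--                 ep = (8 - eave_w) // 2
--                 for c in range(ep, ep + eave_w): g[r][c] = True
--             else:                                          # body
--                 bp = (8 - body_w) // 2
--                 for c in range(bp, bp + body_w): g[r][c] = True
--         r_cur = r_end
--     # Spire at very top
--     g[0] = [False, False, False, True, True, False, False, False]
--     return g
-- ===== SOURCE B (Python) =====
-- def _make_pagoda_grid(height):
--     """Flat single pass over rows, driven by a precomputed tier-boundary table and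
--     precomputed per-tier row templates (body/eave), instead of nested mutation loops."""
--     rows = height * 4
--     tiers = min(4, max(2, height + 1))
--     tier_h, remainder = divmod(rows, tiers)
--     ends, acc = [], 0
--     for t in range(tiers):
--         acc += tier_h + (1 if t >= tiers - remainder else 0)
--         ends.append(acc)
--
--     def band(w):
--         p = (8 - w) // 2
--         return [False] * p + [True] * w + [False] * (8 - p - w)
--
--     body = [band(max(2, min(8, 2 + t * 2))) for t in range(tiers)]
--     eave = [band(min(8, max(2, min(8, 2 + t * 2)) + 2)) for t in range(tiers)]
--
--     def tier_of(r):
--         t = 0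
--         while r >= ends[t]:
--             t += 1
--         return t
--
--     def row(r):
--         if r == 0:
--             return [False, False, False, True, True, False, False, False]
--         if r == rows - 1:
--             return [True] * 8
--         t = tier_of(r)
--         if r == ends[t] - 1 and t < tiers - 1:
--             return eave[t].copy()
--         return body[t].copy()
--
--     return [row(r) for r in range(rows)]
-- ===== Notes on version B (the rewrite author's own statement) =====
-- stated objective: alternative
-- what changed: B replaces A's nested tier/row loops that mutate a pre-built grid cell by cell (with an r_cur accumulator) by precomputing the tier boundary table and per-tier body/eave row templates once, then rendering the grid in one flat pass that looks up each row's tier and copies the right template.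
import Mathlib
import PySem

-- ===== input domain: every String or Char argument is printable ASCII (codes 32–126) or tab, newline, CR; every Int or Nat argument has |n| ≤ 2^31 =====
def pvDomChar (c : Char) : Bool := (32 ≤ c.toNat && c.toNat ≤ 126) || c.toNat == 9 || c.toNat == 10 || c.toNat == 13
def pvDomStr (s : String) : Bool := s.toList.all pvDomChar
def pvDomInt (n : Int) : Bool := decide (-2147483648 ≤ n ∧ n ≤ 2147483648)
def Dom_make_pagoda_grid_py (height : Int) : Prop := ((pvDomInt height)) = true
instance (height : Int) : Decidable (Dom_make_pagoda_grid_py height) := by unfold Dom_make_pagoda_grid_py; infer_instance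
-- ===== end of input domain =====

-- B replaces A's nested tier/row mutation loops by a precomputed tier-boundary table plus per-tier
-- row templates and one flat row pass (objective: alternative decomposition, similar cost).
-- Pre_ excludes exactly the heights on which A raises IndexError before returning.

-- ===== PORT A =====
-- pySetD/pyGetD are exact for the in-range non-negative indices guaranteed by Pre_ (height ≥ 1);
-- the inner `g[r][c] = True` loop is ported as reading row g[r] once and folding the cell writes.
def make_pagoda_grid_py (height : Int) : List (List Bool) :=
  let rows := height * 4
  let tiers := min 4 (max 2 (height + 1))
  let g := (PySem.List.pyRange 0 (height * 4) 1).map (fun _ => List.replicate 8 false)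
  let tier_h := PySem.Int.floordiv rows tiers
  let remainder := rows - tier_h * tiers
  let st := (PySem.List.pyRange 0 tiers 1).foldl (fun (st : List (List Bool) × Int) t =>
    let th := tier_h + (if t ≥ tiers - remainder then (1:Int) else 0)
    let r_end := st.2 + th
    let body_w := max 2 (min 8 (2 + t * 2))
    let eave_w := min 8 (body_w + 2)
    let g' := (PySem.List.pyRange st.2 r_end 1).foldl (fun g r =>
      if r = rows - 1 then
        PySem.List.pySetD g r (List.replicate 8 true)
      else if r = r_end - 1 ∧ t < tiers - 1 then
        let ep := PySem.Int.floordiv (8 - eave_w) 2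
        PySem.List.pySetD g r ((PySem.List.pyRange ep (ep + eave_w) 1).foldl
          (fun row c => PySem.List.pySetD row c true) (PySem.List.pyGetD g r []))
      else
        let bp := PySem.Int.floordiv (8 - body_w) 2
        PySem.List.pySetD g r ((PySem.List.pyRange bp (bp + body_w) 1).foldl
          (fun row c => PySem.List.pySetD row c true) (PySem.List.pyGetD g r []))
      ) st.1
    (g', r_end)) (g, 0)
  PySem.List.pySetD st.1 0 [false, false, false, true, true, false, false, false]

-- port of tier_of's `while r >= ends[t]: t += 1` scan (first index with r < ends[t])
def pvFindTier : List Int → Int → Int → Int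
  | [], _, i => i
  | e :: es, r, i => if r < e then i else pvFindTier es r (i + 1)

def make_pagoda_grid_py_alt (height : Int) : List (List Bool) :=
  let rows := height * 4
  let tiers := min 4 (max 2 (height + 1))
  let tier_h := PySem.Int.floordiv rows tiers
  let remainder := PySem.Int.mod rows tiers
  let ends := ((PySem.List.pyRange 0 tiers 1).foldl (fun (st : List Int × Int) t =>
      let acc := st.2 + tier_h + (if t ≥ tiers - remainder then (1:Int) else 0)
      (st.1 ++ [acc], acc)) ([], 0)).1
  let band := fun (w : Int) =>
    let p := PySem.Int.floordiv (8 - w) 2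
    List.replicate p.toNat false ++ List.replicate w.toNat true ++ List.replicate (8 - p - w).toNat false
  let body := (PySem.List.pyRange 0 tiers 1).map (fun t => band (max 2 (min 8 (2 + t * 2))))
  let eave := (PySem.List.pyRange 0 tiers 1).map (fun t => band (min 8 (max 2 (min 8 (2 + t * 2)) + 2)))
  (PySem.List.pyRange 0 rows 1).map (fun r =>
    if r = 0 then [false, false, false, true, true, false, false, false]
    else if r = rows - 1 then List.replicate 8 true
    else
      let t := pvFindTier ends r 0
      if r = PySem.List.pyGetD ends t 0 - 1 ∧ t < tiers - 1 then PySem.List.pyGetD eave t []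
      else PySem.List.pyGetD body t [])

-- ===== PRECONDITION & SPEC =====
-- Pre_ excludes exactly the non-positive heights: there the grid is empty and A's final spire
-- assignment `g[0] = ...` raises IndexError; A returns normally on every other height.
def Pre_make_pagoda_grid_py (height : Int) : Prop := 1 ≤ height
instance (height : Int) : Decidable (Pre_make_pagoda_grid_py height) := by unfold Pre_make_pagoda_grid_py; infer_instance
def pvWitness_make_pagoda_grid_py : Int := 3

def Spec_make_pagoda_grid_py (height : Int) (out : List (List Bool)) : Prop := out = make_pagoda_grid_py_alt height
instance (height : Int) (out : List (List Bool)) : Decidable (Spec_make_pagoda_grid_py height out) := by unfold Spec_make_pagoda_grid_py; infer_instance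

-- ===== CLAIM (what is proved, stated in full; the proofs are below) =====
def Claim_equal_make_pagoda_grid_py : Prop := ∀ (height : Int), Dom_make_pagoda_grid_py height → Pre_make_pagoda_grid_py height → Spec_make_pagoda_grid_py height (make_pagoda_grid_py height)

-- ===== LEMMAS AND PROOFS =====
def pvWrite (a b : Int) (F : Int → List Bool → List Bool) (g : List (List Bool)) : List (List Bool) :=
  (PySem.List.pyRange a b 1).foldl
    (fun g r => PySem.List.pySetD g r (F r (PySem.List.pyGetD g r []))) g

theorem pvWrite_length (a b : Int) (F : Int → List Bool → List Bool) (g : List (List Bool)) :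
    (pvWrite a b F g).length = g.length := by
  unfold pvWrite
  generalize PySem.List.pyRange a b 1 = l
  induction l generalizing g with
  | nil => rfl
  | cons x xs ih => simp [List.foldl, ih, PySem.List.length_pySetD]

theorem pvWrite_getElem? (a b : Int) (F : Int → List Bool → List Bool) (g : List (List Bool))
    (h0 : 0 ≤ a) (hb : b ≤ (g.length : Int)) (i : Nat) :
    (pvWrite a b F g)[i]? =
      if a ≤ (i : Int) ∧ (i : Int) < b then (g[i]?).map (F (i : Int)) else g[i]? := by
  by_cases hab : b ≤ a
  · rw [pvWrite, PySem.List.pyRange_one_eq_nil hab]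
    simp only [List.foldl_nil]
    rw [if_neg (by omega)]
  · push Not at hab
    have key : ∀ n : Nat, ∀ a : Int, 0 ≤ a → (b - a).toNat = n → ∀ g : List (List Bool), b ≤ (g.length : Int) →
        (pvWrite a b F g)[i]? =
          if a ≤ (i : Int) ∧ (i : Int) < b then (g[i]?).map (F (i : Int)) else g[i]? := by
      intro n
      induction n with
      | zero =>
        intro a ha hn g hg
        rw [pvWrite, PySem.List.pyRange_one_eq_nil (by omega)]
        simp only [List.foldl_nil]
        rw [if_neg (by omega)]
      | succ n ih =>
        intro a ha hn g hg
        rw [pvWrite, PySem.List.pyRange_one_cons (by omega)]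
        simp only [List.foldl_cons]
        have harng : a.toNat < g.length := by omega
        have hset : PySem.List.pySetD g a (F a (PySem.List.pyGetD g a [])) =
            g.set a.toNat (F a (PySem.List.pyGetD g a [])) := PySem.List.pySetD_of_nonneg _ _ ha
        rw [hset]
        have := ih (a + 1) (by omega) (by omega)
          (g.set a.toNat (F a (PySem.List.pyGetD g a []))) (by simp; omega)
        rw [pvWrite] at this
        rw [this]
        by_cases hia : (i : Int) = a
        · have : i = a.toNat := by omega
          subst this
          rw [if_neg (by omega), if_pos (by omega)]
          rw [List.getElem?_set_self (by omega)]
          rw [List.getElem?_eq_getElem harng]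
          simp only [Option.map_some]
          rw [hia]
          rw [PySem.List.pyGetD_of_nonneg _ _ ha, List.getD_eq_getElem g [] harng]
        · rw [List.getElem?_set_ne (by omega)]
          by_cases hc : a + 1 ≤ (i : Int) ∧ (i : Int) < b
          · rw [if_pos hc, if_pos (by omega)]
          · rw [if_neg hc, if_neg (by omega)]
    exact key (b - a).toNat a h0 rfl g hb

def pvF2 (rows e lo1 hi1 lo2 hi2 : Int) (r : Int) (v : List Bool) : List Bool :=
  if r = rows - 1 then List.replicate 8 true
  else if r = e then List.foldl (fun row c => PySem.List.pySetD row c true) v (PySem.List.pyRange lo1 hi1 1)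
  else List.foldl (fun row c => PySem.List.pySetD row c true) v (PySem.List.pyRange lo2 hi2 1)

def pvF3 (rows : Int) (r : Int) (v : List Bool) : List Bool :=
  if r = rows - 1 then List.replicate 8 true
  else List.foldl (fun row c => PySem.List.pySetD row c true) v (PySem.List.pyRange 0 8 1)

theorem foldl_pvWrite2 (a b rows e lo1 hi1 lo2 hi2 : Int) (g : List (List Bool)) :
    List.foldl (fun g r =>
      if r = rows - 1 then PySem.List.pySetD g r (List.replicate 8 true)
      else if r = e then PySem.List.pySetD g r (List.foldl (fun row c => PySem.List.pySetD row c true) (PySem.List.pyGetD g r []) (PySem.List.pyRange lo1 hi1 1))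
      else PySem.List.pySetD g r (List.foldl (fun row c => PySem.List.pySetD row c true) (PySem.List.pyGetD g r []) (PySem.List.pyRange lo2 hi2 1))) g (PySem.List.pyRange a b 1)
    = pvWrite a b (pvF2 rows e lo1 hi1 lo2 hi2) g := by
  unfold pvWrite
  apply PySem.List.foldl_congr_mem
  intro acc x _
  unfold pvF2
  split_ifs <;> rfl

theorem foldl_pvWrite3 (a b rows : Int) (g : List (List Bool)) :
    List.foldl (fun g r =>
      if r = rows - 1 then PySem.List.pySetD g r (List.replicate 8 true)
      else PySem.List.pySetD g r (List.foldl (fun row c => PySem.List.pySetD row c true) (PySem.List.pyGetD g r []) (PySem.List.pyRange 0 8 1))) g (PySem.List.pyRange a b 1)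
    = pvWrite a b (pvF3 rows) g := by
  unfold pvWrite
  apply PySem.List.foldl_congr_mem
  intro acc x _
  unfold pvF3
  split_ifs <;> rfl

theorem pvA_char (h : Int) (h3 : 3 ≤ h) :
    make_pagoda_grid_py h = PySem.List.pySetD
      (pvWrite (h+h+h) (h+h+h+h) (pvF3 (h*4))
      (pvWrite (h+h) (h+h+h) (pvF2 (h*4) (h+h+h-1) 0 8 1 7)
      (pvWrite h (h+h) (pvF2 (h*4) (h+h-1) 1 7 2 6)
      (pvWrite 0 h (pvF2 (h*4) (h-1) 2 6 3 5)
      (List.replicate (h*4).toNat (List.replicate 8 false)))))) 0 [false, false, false, true, true, false, false, false] := by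
  have htiers : min 4 (max 2 (h+1)) = (4:Int) := by omega
  have hdiv : PySem.Int.floordiv (h*4) 4 = h := by
    rw [PySem.Int.floordiv_eq_iff_of_pos (by norm_num)]; omega
  have hr4 : PySem.List.pyRange 0 4 1 = [0,1,2,3] := by decide
  simp only [make_pagoda_grid_py]
  rw [htiers, hdiv, hr4]
  simp only [List.foldl_cons, List.foldl_nil, sub_self]
  norm_num
  rw [foldl_pvWrite2, foldl_pvWrite2, foldl_pvWrite2, foldl_pvWrite3]

def pvRow (h r : Int) : List Bool :=
  if r = 0 then [false, false, false, true, true, false, false, false]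
  else if r = h*4 - 1 then List.replicate 8 true
  else if r < h then (if r = h - 1 then [false,false,true,true,true,true,false,false]
                      else [false,false,false,true,true,false,false,false])
  else if r < h+h then (if r = h+h-1 then [false,true,true,true,true,true,true,false]
                      else [false,false,true,true,true,true,false,false])
  else if r < h+h+h then (if r = h+h+h-1 then List.replicate 8 true
                      else [false,true,true,true,true,true,true,false])
  else List.replicate 8 true

theorem pvB_elem (h : Int) (h3 : 3 ≤ h) (i : Nat) (hi : (i:Int) < h*4) :
    (make_pagoda_grid_py_alt h)[i]? = some (pvRow h i) := by
  have htiers : min 4 (max 2 (h+1)) = (4:Int) := by omega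
  have hdiv : PySem.Int.floordiv (h*4) 4 = h := by
    rw [PySem.Int.floordiv_eq_iff_of_pos (by norm_num)]; omega
  have hmod : PySem.Int.mod (h*4) 4 = 0 := by
    rw [PySem.Int.mod_eq_zero_iff_dvd]; exact ⟨h, by ring⟩
  have hr4 : PySem.List.pyRange 0 4 1 = [0,1,2,3] := by decide
  have hg1 : PySem.List.pyGetD [h, h+h, h+h+h, h+h+h+h] 0 0 = h := by simp [PySem.List.pyGetD]
  have hg2 : PySem.List.pyGetD [h, h+h, h+h+h, h+h+h+h] 1 0 = h+h := by simp [PySem.List.pyGetD]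
  have hg3 : PySem.List.pyGetD [h, h+h, h+h+h, h+h+h+h] 2 0 = h+h+h := by simp [PySem.List.pyGetD]
  simp only [make_pagoda_grid_py_alt, htiers, hdiv, hmod, hr4]
  norm_num [List.foldl]
  refine ⟨hi, ?_⟩
  unfold pvRow
  by_cases c0 : i = 0
  · subst c0; norm_num
  · rw [if_neg c0, if_neg (by omega : ¬((i:Nat):Int) = 0)]
    by_cases cL : (i:Int) = h*4 - 1
    · rw [if_pos cL, if_pos cL]
    · rw [if_neg cL, if_neg cL]
      by_cases cT0 : (i:Int) < h
      · have ht : pvFindTier [h, h+h, h+h+h, h+h+h+h] (↑i) 0 = 0 := by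
          simp only [pvFindTier]; rw [if_pos cT0]
        rw [if_pos cT0]
        simp only [ht, hg1]
        by_cases cE : (i:Int) = h - 1
        · rw [if_pos (by omega : (i:Int) = h - 1 ∧ (0:Int) < 3), if_pos cE]; decide
        · rw [if_neg (by omega : ¬((i:Int) = h - 1 ∧ (0:Int) < 3)), if_neg cE]; decide
      · by_cases cT1 : (i:Int) < h+h
        · have ht : pvFindTier [h, h+h, h+h+h, h+h+h+h] (↑i) 0 = 1 := by
            simp only [pvFindTier]; rw [if_neg cT0, if_pos cT1]; norm_num
          rw [if_neg cT0, if_pos cT1]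
          simp only [ht, hg2]
          by_cases cE : (i:Int) = h+h-1
          · rw [if_pos (by omega : (i:Int) = h+h-1 ∧ (1:Int) < 3), if_pos cE]; decide
          · rw [if_neg (by omega : ¬((i:Int) = h+h-1 ∧ (1:Int) < 3)), if_neg cE]; decide
        · by_cases cT2 : (i:Int) < h+h+h
          · have ht : pvFindTier [h, h+h, h+h+h, h+h+h+h] (↑i) 0 = 2 := by
              simp only [pvFindTier]; rw [if_neg cT0, if_neg cT1, if_pos cT2]; norm_num
            rw [if_neg cT0, if_neg cT1, if_pos cT2]
            simp only [ht, hg3]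
            by_cases cE : (i:Int) = h+h+h-1
            · rw [if_pos (by omega : (i:Int) = h+h+h-1 ∧ (2:Int) < 3), if_pos cE]; decide
            · rw [if_neg (by omega : ¬((i:Int) = h+h+h-1 ∧ (2:Int) < 3)), if_neg cE]; decide
          · have ht : pvFindTier [h, h+h, h+h+h, h+h+h+h] (↑i) 0 = 3 := by
              simp only [pvFindTier]
              rw [if_neg cT0, if_neg cT1, if_neg cT2, if_pos (by omega : (i:Int) < h+h+h+h)]
              norm_num
            rw [if_neg cT0, if_neg cT1, if_neg cT2]
            simp only [ht]
            rw [if_neg (by norm_num : ¬((i:Int) = PySem.List.pyGetD [h, h+h, h+h+h, h+h+h+h] 3 0 - 1 ∧ (3:Int) < 3))]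
            decide

theorem pvA_elem (h : Int) (h3 : 3 ≤ h) (i : Nat) (hi : (i:Int) < h*4) :
    (make_pagoda_grid_py h)[i]? = some (pvRow h i) := by
  rw [pvA_char h h3]
  rw [PySem.List.pySetD_of_nonneg _ _ (by norm_num : (0:Int) ≤ 0)]
  have hlen : ∀ g : List (List Bool), g.length = (h*4).toNat →
      (h:Int) ≤ (g.length : Int) ∧ h+h ≤ (g.length : Int) ∧ h+h+h ≤ (g.length : Int) ∧ h+h+h+h ≤ (g.length : Int) := by
    intro g hg; rw [hg]; omega
  have L0 : (List.replicate (h*4).toNat (List.replicate 8 false) : List (List Bool)).length = (h*4).toNat := by simp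
  have L1 : (pvWrite 0 h (pvF2 (h*4) (h-1) 2 6 3 5) (List.replicate (h*4).toNat (List.replicate 8 false))).length = (h*4).toNat := by
    rw [pvWrite_length]; exact L0
  have L2 : (pvWrite h (h+h) (pvF2 (h*4) (h+h-1) 1 7 2 6) (pvWrite 0 h (pvF2 (h*4) (h-1) 2 6 3 5) (List.replicate (h*4).toNat (List.replicate 8 false)))).length = (h*4).toNat := by
    rw [pvWrite_length]; exact L1
  have L3 : (pvWrite (h+h) (h+h+h) (pvF2 (h*4) (h+h+h-1) 0 8 1 7) (pvWrite h (h+h) (pvF2 (h*4) (h+h-1) 1 7 2 6) (pvWrite 0 h (pvF2 (h*4) (h-1) 2 6 3 5) (List.replicate (h*4).toNat (List.replicate 8 false))))).length = (h*4).toNat := by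
    rw [pvWrite_length]; exact L2
  have L4 : (pvWrite (h+h+h) (h+h+h+h) (pvF3 (h*4)) (pvWrite (h+h) (h+h+h) (pvF2 (h*4) (h+h+h-1) 0 8 1 7) (pvWrite h (h+h) (pvF2 (h*4) (h+h-1) 1 7 2 6) (pvWrite 0 h (pvF2 (h*4) (h-1) 2 6 3 5) (List.replicate (h*4).toNat (List.replicate 8 false)))))).length = (h*4).toNat := by
    rw [pvWrite_length]; exact L3
  by_cases c0 : i = 0
  · subst c0
    rw [show Int.toNat 0 = 0 from rfl]
    rw [List.getElem?_set_self (by rw [L4]; omega)]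
    unfold pvRow
    norm_num
  · rw [List.getElem?_set_ne (by omega)]
    rw [pvWrite_getElem? _ _ _ _ (by omega) (by exact_mod_cast (hlen _ L3).2.2.2)]
    rw [pvWrite_getElem? _ _ _ _ (by omega) (by exact_mod_cast (hlen _ L2).2.2.1)]
    rw [pvWrite_getElem? _ _ _ _ (by omega) (by exact_mod_cast (hlen _ L1).2.1)]
    rw [pvWrite_getElem? _ _ _ _ (by norm_num) (by exact_mod_cast (hlen _ L0).1)]
    rw [List.getElem?_replicate_of_lt (by omega)]
    unfold pvRow
    rw [if_neg (by omega : ¬((i:Nat):Int) = 0)]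
    by_cases cL : (i:Int) = h*4 - 1
    · rw [if_pos cL]
      by_cases cT2' : h+h+h ≤ (i:Int)
      · rw [if_pos (by omega), if_neg (by omega), if_neg (by omega), if_neg (by omega)]
        simp only [Option.map_some]
        unfold pvF3
        rw [if_pos cL]
      · rw [if_neg (by omega)]
        -- i = h*4-1 but i < 3h impossible since h*4-1 ≥ 3h for h ≥ 3... h*4-1 ≥ h+h+h ↔ h ≥ 1
        omega
    · rw [if_neg cL]
      by_cases cT0 : (i:Int) < h
      · rw [if_neg (by omega), if_neg (by omega), if_neg (by omega), if_pos (by omega)]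
        simp only [Option.map_some]
        unfold pvF2
        rw [if_neg (by omega : ¬((i:Nat):Int) = h*4-1), if_pos cT0]
        by_cases cE : (i:Int) = h - 1
        · rw [if_pos cE, if_pos cE]; decide
        · rw [if_neg cE, if_neg cE]; decide
      · rw [if_neg cT0]
        by_cases cT1 : (i:Int) < h+h
        · rw [if_neg (by omega), if_neg (by omega), if_pos (by omega), if_neg (by omega)]
          simp only [Option.map_some]
          unfold pvF2
          rw [if_neg (by omega : ¬((i:Nat):Int) = h*4-1), if_pos cT1]
          by_cases cE : (i:Int) = h+h-1
          · rw [if_pos cE, if_pos cE]; decide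
          · rw [if_neg cE, if_neg cE]; decide
        · rw [if_neg cT1]
          by_cases cT2 : (i:Int) < h+h+h
          · rw [if_neg (by omega), if_pos (by omega), if_neg (by omega), if_neg (by omega)]
            simp only [Option.map_some]
            unfold pvF2
            rw [if_neg (by omega : ¬((i:Nat):Int) = h*4-1), if_pos cT2]
            by_cases cE : (i:Int) = h+h+h-1
            · rw [if_pos cE, if_pos cE]; decide
            · rw [if_neg cE, if_neg cE]; decide
          · rw [if_pos (by omega), if_neg (by omega), if_neg (by omega), if_neg (by omega)]
            simp only [Option.map_some]
            unfold pvF3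
            rw [if_neg (by omega : ¬((i:Nat):Int) = h*4-1), if_neg cT2]
            decide

theorem pv_ge3 (h : Int) (h3 : 3 ≤ h) : make_pagoda_grid_py h = make_pagoda_grid_py_alt h := by
  have lA : (make_pagoda_grid_py h).length = (h*4).toNat := by
    rw [pvA_char h h3]
    simp [PySem.List.length_pySetD, pvWrite_length]
  have lB : (make_pagoda_grid_py_alt h).length = (h*4).toNat := by
    simp only [make_pagoda_grid_py_alt]
    simp [PySem.List.length_pyRange_one]
  apply List.ext_getElem?
  intro i
  by_cases hi : (i:Int) < h*4
  · rw [pvA_elem h h3 i hi, pvB_elem h h3 i hi]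
  · rw [List.getElem?_eq_none (by omega), List.getElem?_eq_none (by omega)]

-- ===== VERDICT (by name: the statement is the Claim_ definition above) =====
theorem make_pagoda_grid_py_spec : Claim_equal_make_pagoda_grid_py := by
  intro height _ hpre
  unfold Spec_make_pagoda_grid_py
  have : height = 1 ∨ height = 2 ∨ 3 ≤ height := by
    unfold Pre_make_pagoda_grid_py at hpre; omega
  rcases this with h1 | h2 | h3
  · subst h1; decide
  · subst h2; decide
  · exact pv_ge3 height h3
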